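-- pv_equiv track=rewrite | github.com/RhythmicWave/NovelForge | backend/app/services/ai/core/react_text_agent.py | _process_react_stream_text
-- ===== SOURCE A (Python) =====
-- PROTOCOL_TAGS = ("action",)
--
-- def _process_react_stream_text(state: dict[str, str], new_text: str) -> str:
--     buffer = state.get("buffer", "") + (new_text or "")
--     output_parts: list[str] = []
--
--     while buffer:
--         tag_start = buffer.find("<")
--
--         if tag_start == -1:
--             output_parts.append(buffer)
--             buffer = ""
--             break
--
--         if tag_start > 0:
--             output_parts.append(buffer[:tag_start])
--             buffer = buffer[tag_start:]
--
--         lower = buffer.lower()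
--         potential_tag = None
--         for tag in PROTOCOL_TAGS:
--             prefix = f"<{tag}"
--             if lower.startswith(prefix):
--                 potential_tag = tag
--                 break
--             if len(buffer) < len(prefix) and prefix.startswith(lower):
--                 state["buffer"] = buffer
--                 return "".join(output_parts)
--
--         if not potential_tag:
--             output_parts.append("<")
--             buffer = buffer[1:]
--             continue
--
--         close_token = f"</{potential_tag}>"
--         close_idx = lower.find(close_token)
--         if close_idx == -1:
--             state["buffer"] = buffer
--             return "".join(output_parts)
--
--         block_end = close_idx + len(close_token)
--         block = buffer[:block_end]
--         inner_start = block.find(">")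
--         if inner_start == -1:
--             state["buffer"] = buffer
--             return "".join(output_parts)
--
--         _ = block[inner_start + 1 : close_idx]
--         buffer = buffer[block_end:]
--
--     state["buffer"] = buffer
--     return "".join(output_parts)
-- ===== SOURCE B (Python) =====
-- # Alternative single-pass formulation: lowercase the buffer once and scan with an index pointer,
-- # instead of repeatedly re-slicing and re-lowercasing the remaining buffer.
-- # Mutates state["buffer"] the same way A does (side effect identical to A).
-- def _process_react_stream_text(state: dict[str, str], new_text: str) -> str:
--     buffer = state.get("buffer", "") + (new_text or "")
--     lower = buffer.lower()
--     n = len(buffer)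
--     out: list[str] = []
--     i = 0
--     while True:
--         j = buffer.find("<", i)
--         if j == -1:
--             out.append(buffer[i:])
--             state["buffer"] = ""
--             return "".join(out)
--         out.append(buffer[i:j])
--         i = j
--         if lower.startswith("<action", i):
--             k = lower.find("</action>", i)
--             if k == -1:
--                 state["buffer"] = buffer[i:]
--                 return "".join(out)
--             i = k + len("</action>")
--         elif n - i < len("<action") and "<action".startswith(lower[i:]):
--             state["buffer"] = buffer[i:]
--             return "".join(out)
--         else:
--             out.append("<")
--             i += 1
-- ===== Notes on version B (the rewrite author's own statement) =====
-- stated objective: alternative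
-- what changed: A repeatedly re-slices and re-lowercases the remaining buffer each loop iteration; B lowercases the buffer once and scans it with an index pointer via find(_, i), building no intermediate buffer strings.
import Mathlib
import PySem

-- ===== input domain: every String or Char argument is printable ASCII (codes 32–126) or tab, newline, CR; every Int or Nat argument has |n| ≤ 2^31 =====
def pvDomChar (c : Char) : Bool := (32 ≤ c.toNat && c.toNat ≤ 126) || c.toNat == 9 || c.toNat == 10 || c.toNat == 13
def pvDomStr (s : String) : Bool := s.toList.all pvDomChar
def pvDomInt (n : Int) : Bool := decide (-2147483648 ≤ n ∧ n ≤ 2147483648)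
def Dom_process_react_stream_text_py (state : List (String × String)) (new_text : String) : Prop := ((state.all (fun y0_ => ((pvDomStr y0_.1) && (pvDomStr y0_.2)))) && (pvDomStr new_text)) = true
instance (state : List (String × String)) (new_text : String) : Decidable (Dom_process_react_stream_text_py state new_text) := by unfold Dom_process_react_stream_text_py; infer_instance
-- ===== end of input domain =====

-- B replaces A's repeated re-slicing/re-lowercasing of the remaining buffer with one lowercase
-- pass and an index-pointer scan (objective: alternative). Both Pythons mutate state["buffer"]
-- identically; the theorems here are about the RETURN value only.

-- ===== PORT A =====
-- f"<{tag}" for the single protocol tag "action", and f"</{tag}>"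
def pvTagPrefix : List Char := "<action".toList
def pvCloseToken : List Char := "</action>".toList

-- the 'while buffer:' loop of A; 'fuel' only makes the recursion total (buffer shrinks by ≥ 1
-- each iteration, so 'buffer.length + 1' fuel is never exhausted); output_parts is kept in
-- reverse order (Python appends at the end), joined at each return.
def pvALoop (fuel : Nat) (buffer : List Char) (parts : List (List Char)) : List Char :=
  match fuel with
  | 0 => parts.reverse.flatten
  | fuel + 1 =>
    if buffer = [] then parts.reverse.flatten          -- while buffer: … / state["buffer"] = buffer; return
    else
      let tagStart := PySem.Chars.find buffer ['<']
      if tagStart = -1 then ((buffer :: parts).reverse.flatten)   -- append rest; buffer = ""; break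
      else
        -- if tag_start > 0: output_parts.append(buffer[:tag_start]); buffer = buffer[tag_start:]
        let parts1 := if 0 < tagStart then (PySem.List.slice buffer none (some tagStart)) :: parts else parts
        let buf1 := if 0 < tagStart then PySem.List.slice buffer (some tagStart) none else buffer
        let lower := PySem.Chars.lower buf1
        -- for tag in PROTOCOL_TAGS: (single tag, unrolled)
        if PySem.Chars.startswith lower pvTagPrefix then
          -- potential_tag found
          let closeIdx := PySem.Chars.find lower pvCloseToken
          if closeIdx = -1 then parts1.reverse.flatten           -- state["buffer"] = buffer; return
          else
            let blockEnd := closeIdx + (pvCloseToken.length : Int)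
            let block := PySem.List.slice buf1 none (some blockEnd)
            let innerStart := PySem.Chars.find block ['>']
            if innerStart = -1 then parts1.reverse.flatten       -- state["buffer"] = buffer; return
            else pvALoop fuel (PySem.List.slice buf1 (some blockEnd) none) parts1
        else if buf1.length < pvTagPrefix.length ∧ PySem.Chars.startswith pvTagPrefix lower then
          parts1.reverse.flatten                                  -- state["buffer"] = buffer; return
        else
          pvALoop fuel (PySem.List.slice buf1 (some 1) none) (['<'] :: parts1)

def process_react_stream_text_py (state : List (String × String)) (new_text : String) : String :=
  -- buffer = state.get("buffer", "") + (new_text or "")   ('s or ""' is s for strings)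
  let buffer := (PySem.Dict.getD ⟨state⟩ "buffer" "").toList ++ new_text.toList
  String.ofList (pvALoop (buffer.length + 1) buffer [])

-- ===== PORT B =====
-- B's 'while True' loop: buffer and its one-time lowercase are fixed, i is the scan pointer;
-- fuel = buffer.length + 1 is never exhausted (i strictly increases and stays ≤ length).
-- 'lower.startswith("<action", i)' is ported as startswith on the suffix (exact for 0 ≤ i).
def pvBLoop (fuel : Nat) (buffer lower : List Char) (i : Nat) (out : List (List Char)) : List Char :=
  match fuel with
  | 0 => out.reverse.flatten
  | fuel + 1 =>
    let j := PySem.Chars.findFrom buffer ['<'] (i : Int) none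
    if j = -1 then (((PySem.List.slice buffer (some (i : Int)) none) :: out).reverse.flatten)
    else
      let out1 := (PySem.List.slice buffer (some (i : Int)) (some j)) :: out
      if PySem.Chars.startswith (lower.drop j.toNat) pvTagPrefix then
        let k := PySem.Chars.findFrom lower pvCloseToken j none
        if k = -1 then out1.reverse.flatten                      -- state["buffer"] = buffer[i:]; return
        else pvBLoop fuel buffer lower (k.toNat + pvCloseToken.length) out1
      else if buffer.length - j.toNat < pvTagPrefix.length ∧
              PySem.Chars.startswith pvTagPrefix (lower.drop j.toNat) then
        out1.reverse.flatten                                      -- state["buffer"] = buffer[i:]; return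
      else
        pvBLoop fuel buffer lower (j.toNat + 1) (['<'] :: out1)

def process_react_stream_text_py_alt (state : List (String × String)) (new_text : String) : String :=
  let buffer := (PySem.Dict.getD ⟨state⟩ "buffer" "").toList ++ new_text.toList
  String.ofList (pvBLoop (buffer.length + 1) buffer (PySem.Chars.lower buffer) 0 [])

-- ===== PRECONDITION & SPEC =====
def Spec_process_react_stream_text_py (state : List (String × String)) (new_text : String) (out : String) : Prop := out = process_react_stream_text_py_alt state new_text
instance (state : List (String × String)) (new_text : String) (out : String) : Decidable (Spec_process_react_stream_text_py state new_text out) := by unfold Spec_process_react_stream_text_py; infer_instance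

-- ===== CLAIM (what is proved, stated in full; the proofs are below) =====
def Claim_equal_process_react_stream_text_py : Prop := ∀ (state : List (String × String)) (new_text : String), Dom_process_react_stream_text_py state new_text → Spec_process_react_stream_text_py state new_text (process_react_stream_text_py state new_text)

-- ===== LEMMAS AND PROOFS =====

-- lowering a character never produces '>' unless it already was '>'
theorem pv_lowerChar_gt {c : Char} (h : PySem.Chars.lowerChar c = '>') : c = '>' := by
  unfold PySem.Chars.lowerChar PySem.Chars.isupper at h
  by_cases hu : ('A' ≤ c ∧ c ≤ 'Z')
  · exfalso
    rw [if_pos (by simp [hu.1, hu.2])] at h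
    have h1 := hu.1
    have h2 := hu.2
    rw [Char.le_def, UInt32.le_iff_toNat_le] at h1 h2
    have h5 : c.toNat = c.val.toNat := rfl
    have ha : ('A' : Char).val.toNat = 65 := rfl
    have hz : ('Z' : Char).val.toNat = 90 := rfl
    have h3 := congrArg Char.toNat h
    rw [Char.toNat_ofNat] at h3
    have hv : (c.toNat + 32).isValidChar := by
      left
      omega
    rw [if_pos hv] at h3
    have h4 : ('>' : Char).toNat = 62 := rfl
    omega
  · rw [if_neg (by simpa using fun a b => hu ⟨a, b⟩)] at h
    exact h

theorem pv_flat_cons (c : List Char) (out : List (List Char)) :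
    (c :: out).reverse.flatten = out.reverse.flatten ++ c := by
  simp

theorem pv_loop_eq : ∀ (fuel : Nat) (buf : List Char) (i : Nat) (out parts : List (List Char)),
    i ≤ buf.length →
    out.reverse.flatten = parts.reverse.flatten →
    pvBLoop fuel buf (PySem.Chars.lower buf) i out = pvALoop fuel (buf.drop i) parts := by
  intro fuel
  induction fuel with
  | zero => intro buf i out parts _ hout; simpa [pvALoop, pvBLoop] using hout
  | succ fuel ih =>
    intro buf i out parts hi hout
    have hlowlen : (PySem.Chars.lower buf).length = buf.length := by
      simp [PySem.Chars.lower]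
    have hct9 : pvCloseToken.length = 9 := rfl
    simp only [pvBLoop, pvALoop]
    rw [PySem.Chars.findFrom_natCast buf ['<'] i hi]
    by_cases hF : PySem.Chars.find (buf.drop i) ['<'] = -1
    · -- no '<' in the rest of the buffer: both emit the remainder and stop
      rw [if_pos hF, if_pos rfl]
      by_cases hnil : buf.drop i = []
      · rw [if_pos hnil]
        simpa [pv_flat_cons, PySem.List.slice_from_natCast, hnil] using hout
      · rw [if_neg hnil, if_pos hF]
        simp [PySem.List.slice_from_natCast, hout]
    · -- '<' found at offset F in buf.drop i
      have h0F : 0 ≤ PySem.Chars.find (buf.drop i) ['<'] := by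
        have := PySem.Chars.neg_one_le_find (buf.drop i) ['<']
        omega
      obtain ⟨hpre, -⟩ := PySem.Chars.find_spec (s := buf.drop i) (sub := ['<']) h0F
      have hfl : i + (PySem.Chars.find (buf.drop i) ['<']).toNat < buf.length := by
        have h := hpre.length_le
        simp at h
        omega
      set F := PySem.Chars.find (buf.drop i) ['<'] with hFdef
      clear_value F
      have hnil : ¬ buf.drop i = [] := by
        intro h
        have hlen0 := congrArg List.length h
        simp at hlen0
        omega
      simp only [if_neg hF, if_neg hnil]
      rw [show (i : Int) + F = ((i + F.toNat : Nat) : Int) by omega]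
      set j : Nat := i + F.toNat with hjdef
      clear_value j
      simp only [Int.toNat_natCast]
      rw [if_neg (show ¬((j : Nat) : Int) = -1 by omega)]
      -- the chunk emitted before the '<'
      have hchunkB : PySem.List.slice buf (some (i : Int)) (some ((j : Nat) : Int)) =
          (buf.drop i).take F.toNat := by
        rw [PySem.List.slice_natCast, show j - i = F.toNat by omega]
      have hst : PySem.List.slice (buf.drop i) none (some F) = (buf.drop i).take F.toNat := by
        rw [PySem.List.slice_to _ h0F]
      have hsf : PySem.List.slice (buf.drop i) (some F) none = (buf.drop i).drop F.toNat := by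
        rw [PySem.List.slice_from _ h0F]
      -- A's buffer after the trim (both the F = 0 and F > 0 cases give buf.drop j)
      have hbuf1 : (if 0 < F then PySem.List.slice (buf.drop i) (some F) none else buf.drop i)
          = buf.drop j := by
        by_cases h0 : 0 < F
        · rw [if_pos h0, hsf, List.drop_drop]
          congr 1
          omega
        · rw [if_neg h0]
          congr 1
          omega
      -- A's parts after the trim: flatten-equal to B's out1
      have hout1 : ((PySem.List.slice buf (some (i : Int)) (some ((j : Nat) : Int))) :: out).reverse.flatten
          = (if 0 < F then PySem.List.slice (buf.drop i) none (some F) :: parts else parts).reverse.flatten := by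
        by_cases h0 : 0 < F
        · rw [if_pos h0, pv_flat_cons, pv_flat_cons, hout, hchunkB, hst]
        · rw [if_neg h0, pv_flat_cons, hout, hchunkB, show F.toNat = 0 by omega]
          simp
      rw [hbuf1]
      -- the two lowercase views agree
      have hlow : PySem.Chars.lower (buf.drop j) = (PySem.Chars.lower buf).drop j := by
        simp [PySem.Chars.lower, List.map_drop]
      have hjlen : j ≤ buf.length := by omega
      rw [← hlow]
      have hlen1 : (buf.drop j).length = buf.length - j := by simp
      rw [hlen1]
      by_cases hs : PySem.Chars.startswith (PySem.Chars.lower (buf.drop j)) pvTagPrefix = true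
      · -- "<action" matched: find the close token
        simp only [if_pos hs]
        rw [PySem.Chars.findFrom_natCast (PySem.Chars.lower buf) pvCloseToken j
          (by rw [hlowlen]; exact hjlen), ← hlow]
        by_cases hC : PySem.Chars.find (PySem.Chars.lower (buf.drop j)) pvCloseToken = -1
        · simp only [if_pos hC]
          exact (if_pos trivial).trans hout1
        · have h0C : 0 ≤ PySem.Chars.find (PySem.Chars.lower (buf.drop j)) pvCloseToken := by
            have := PySem.Chars.neg_one_le_find (PySem.Chars.lower (buf.drop j)) pvCloseToken
            omega
          obtain ⟨hcpre, -⟩ := PySem.Chars.find_spec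
            (s := PySem.Chars.lower (buf.drop j)) (sub := pvCloseToken) h0C
          have hclen' := hcpre.length_le
          set C := PySem.Chars.find (PySem.Chars.lower (buf.drop j)) pvCloseToken with hCdef
          clear_value C
          have hclen : C.toNat + 9 ≤ buf.length - j := by
            rw [hct9] at hclen'
            simp only [List.length_drop, List.length_map, PySem.Chars.lower] at hclen'
            omega
          simp only [if_neg hC]
          rw [show ((j : Nat) : Int) + C = ((j + C.toNat : Nat) : Int) by omega]
          rw [if_neg (show ¬((j + C.toNat : Nat) : Int) = -1 by omega)]
          rw [hct9]
          rw [show C + ((9 : Nat) : Int) = ((C.toNat + 9 : Nat) : Int) by omega]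
          -- A's inner '>' check can never fail: the close token itself contains '>'
          have hblock : PySem.List.slice (buf.drop j) none (some ((C.toNat + 9 : Nat) : Int))
              = (buf.drop j).take (C.toNat + 9) := PySem.List.slice_to_natCast _ _
          have hinner : ¬ PySem.Chars.find ((buf.drop j).take (C.toNat + 9)) ['>'] = -1 := by
            rw [PySem.Chars.find_eq_neg_one_iff]
            intro hno
            apply hno
            rw [List.singleton_infix_iff]
            obtain ⟨t, ht⟩ := hcpre
            have hgt : (PySem.Chars.lower (buf.drop j))[C.toNat + 8]? = some '>' := by
              have h8 : ((PySem.Chars.lower (buf.drop j)).drop C.toNat)[8]? = some '>' := by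
                rw [← ht, List.getElem?_append_left (by rw [hct9]; omega)]
                decide
              rw [List.getElem?_drop] at h8
              exact h8
            have h9 : (((buf.drop j).take (C.toNat + 9)).map PySem.Chars.lowerChar)[C.toNat + 8]? = some '>' := by
              have hmap : ((buf.drop j).take (C.toNat + 9)).map PySem.Chars.lowerChar
                  = (PySem.Chars.lower (buf.drop j)).take (C.toNat + 9) := by
                simp [PySem.Chars.lower, List.map_take]
              rw [hmap, List.getElem?_take_of_lt (by omega)]
              exact hgt
            rw [List.getElem?_map] at h9
            obtain ⟨x, hx, hxl⟩ := Option.map_eq_some_iff.mp h9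
            rw [← pv_lowerChar_gt hxl]
            exact List.mem_of_getElem? hx
          rw [hblock, if_neg hinner]
          -- both continue past the stripped <action> block
          have harg : PySem.List.slice (buf.drop j) (some ((C.toNat + 9 : Nat) : Int)) none
              = buf.drop (j + C.toNat + 9) := by
            rw [PySem.List.slice_from_natCast, List.drop_drop]
            congr 1
          rw [harg]
          exact ih buf (j + C.toNat + 9) _ _ (by omega) hout1
      · -- no "<action" at this position
        simp only [if_neg hs]
        by_cases hsh : buf.length - j < pvTagPrefix.length ∧
            PySem.Chars.startswith pvTagPrefix (PySem.Chars.lower (buf.drop j)) = true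
        · simp only [if_pos hsh]
          exact hout1
        · simp only [if_neg hsh]
          have harg : PySem.List.slice (buf.drop j) (some 1) none = buf.drop (j + 1) := by
            rw [PySem.List.slice_from_one, ← List.drop_drop]
            simp
          rw [harg]
          refine ih buf (j + 1) _ _ (by omega) ?_
          rw [pv_flat_cons, pv_flat_cons, pv_flat_cons, ← hout1, pv_flat_cons]

-- ===== VERDICT (by name: the statement is the Claim_ definition above) =====
theorem process_react_stream_text_py_spec : Claim_equal_process_react_stream_text_py := by
  intro state new_text _
  unfold Spec_process_react_stream_text_py process_react_stream_text_py process_react_stream_text_py_alt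
  show String.ofList (pvALoop (((PySem.Dict.getD ⟨state⟩ "buffer" "").toList ++ new_text.toList).length + 1)
      ((PySem.Dict.getD ⟨state⟩ "buffer" "").toList ++ new_text.toList) []) =
    String.ofList (pvBLoop (((PySem.Dict.getD ⟨state⟩ "buffer" "").toList ++ new_text.toList).length + 1)
      ((PySem.Dict.getD ⟨state⟩ "buffer" "").toList ++ new_text.toList)
      (PySem.Chars.lower ((PySem.Dict.getD ⟨state⟩ "buffer" "").toList ++ new_text.toList)) 0 [])
  rw [pv_loop_eq _ _ 0 [] [] (Nat.zero_le _) rfl, List.drop_zero]
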